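-- pv_equiv track=rewrite | github.com/SalomonisLab/altanalyze3 | altanalyze3/components/visualization/isoform_structure_view.py | strip_terminal_coords
-- ===== SOURCE A (Python) =====
-- def split_token(token, default_gene):
--     gene_id = default_gene
--     core = token
--     if ':' in token:
--         gene_id, core = token.split(':', 1)
--     coord = None
--     base = core
--     if '_' in core:
--         base, coord_str = core.rsplit('_', 1)
--         try:
--             coord = int(coord_str)
--         except ValueError:
--             base = core
--             coord = None
--     return gene_id, base, coord
--
-- def strip_terminal_coords(tokens, default_gene):
--     if not tokens:
--         return []
--     trimmed = list(tokens)
--     drop_indices = set()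
--     for idx in (0, len(trimmed) - 1):
--         gene_id, base, coord = split_token(trimmed[idx], default_gene)
--         if coord is not None and base.startswith('E'):
--             drop_indices.add(idx)
--     if drop_indices:
--         return [tok for i, tok in enumerate(trimmed) if i not in drop_indices]
--     return trimmed
-- ===== SOURCE B (Python) =====
-- def split_token(token, default_gene):
--     gene_id = default_gene
--     core = token
--     if ':' in token:
--         gene_id, core = token.split(':', 1)
--     coord = None
--     base = core
--     if '_' in core:
--         base, coord_str = core.rsplit('_', 1)
--         try:
--             coord = int(coord_str)
--         except ValueError:
--             base = core
--             coord = None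
--     return gene_id, base, coord
--
-- def strip_terminal_coords(tokens, default_gene):
--     def _trim_head(seq):
--         if seq:
--             _gene, base, coord = split_token(seq[0], default_gene)
--             if coord is not None and base.startswith('E'):
--                 return seq[1:]
--         return seq
--     # trim the head, then trim the head of the reversal (= the tail), then un-reverse
--     return _trim_head(_trim_head(list(tokens))[::-1])[::-1]
-- ===== Notes on version B (the rewrite author's own statement) =====
-- stated objective: simpler
-- what changed: Instead of collecting terminal indices into a set and filtering the enumerated list, B applies one uniform head-trimming helper twice, once on the list and once on its reversal (so the tail case is the head case), and reverses back.
import Mathlib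
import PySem

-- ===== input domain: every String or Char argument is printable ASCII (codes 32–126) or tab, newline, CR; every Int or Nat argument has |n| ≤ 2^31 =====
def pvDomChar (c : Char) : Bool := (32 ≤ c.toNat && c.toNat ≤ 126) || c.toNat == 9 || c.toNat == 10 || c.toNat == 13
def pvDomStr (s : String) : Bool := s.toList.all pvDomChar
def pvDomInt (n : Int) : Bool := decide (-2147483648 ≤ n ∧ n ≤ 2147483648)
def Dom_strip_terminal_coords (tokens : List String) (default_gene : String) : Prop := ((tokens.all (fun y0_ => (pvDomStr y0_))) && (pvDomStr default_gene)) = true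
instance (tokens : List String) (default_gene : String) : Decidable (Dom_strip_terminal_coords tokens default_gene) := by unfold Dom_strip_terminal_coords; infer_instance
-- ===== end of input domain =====

-- B replaces A's index-set-and-filter pass by one head-trimming helper applied twice, on the list and on its reversal (objective: simpler).

-- ===== PORT A =====
-- shared module helper split_token (used verbatim by both Pythons)
def pv_split_token (token : String) (default_gene : String) : String × String × Option Int :=
  let (gene_id, core) :=
    if PySem.Str.isIn ":" token then
      -- token.split(':', 1) with ':' known present: split at the FIRST ':' (exact)
      let cs := token.toList
      let i := cs.idxOf ':'
      (String.ofList (cs.take i), String.ofList (cs.drop (i+1)))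
    else (default_gene, token)
  let (base, coord) :=
    if PySem.Str.isIn "_" core then
      -- core.rsplit('_', 1) with '_' known present: split at the LAST '_' (exact)
      let r := core.toList.reverse
      let j := r.idxOf '_'
      let coord_str := (r.take j).reverse
      let base' := (r.drop (j+1)).reverse
      match PySem.Int.ofChars? coord_str with
      | some c => (String.ofList base', some c)
      | none => (core, (none : Option Int))
    else (core, none)
  (gene_id, base, coord)

def strip_terminal_coords (tokens : List String) (default_gene : String) : List String :=
  if tokens = [] then []
  else
    let trimmed := tokens
    let drop_indices : PySem.Set Int :=
      [(0:Int), (trimmed.length : Int) - 1].foldl (fun s idx =>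
        let r := pv_split_token (PySem.List.pyGetD trimmed idx "") default_gene
        if r.2.2.isSome && PySem.Str.startswith r.2.1 "E" then PySem.Set.add s idx else s)
        PySem.Set.empty
    if drop_indices ≠ [] then
      ((PySem.List.enumerate trimmed 0).filter (fun p => !(PySem.Set.contains drop_indices p.1))).map (·.2)
    else trimmed

-- ===== PORT B =====
-- Source B's _trim_head: drop the head iff it is a coordinate-tagged exon token
def pv_trim_head (default_gene : String) (seq : List String) : List String :=
  match seq with
  | [] => seq
  | x :: xs =>
      let r := pv_split_token x default_gene
      if r.2.2.isSome && PySem.Str.startswith r.2.1 "E" then xs else x :: xs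

def strip_terminal_coords_alt (tokens : List String) (default_gene : String) : List String :=
  (pv_trim_head default_gene ((pv_trim_head default_gene tokens).reverse)).reverse

-- ===== PRECONDITION & SPEC =====
def Spec_strip_terminal_coords (tokens : List String) (default_gene : String) (out : List String) : Prop := out = strip_terminal_coords_alt tokens default_gene
instance (tokens : List String) (default_gene : String) (out : List String) : Decidable (Spec_strip_terminal_coords tokens default_gene out) := by unfold Spec_strip_terminal_coords; infer_instance

-- ===== CLAIM (what is proved, stated in full; the proofs are below) =====
def Claim_equal_strip_terminal_coords : Prop := ∀ (tokens : List String) (default_gene : String), Dom_strip_terminal_coords tokens default_gene → Spec_strip_terminal_coords tokens default_gene (strip_terminal_coords tokens default_gene)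

-- ===== LEMMAS AND PROOFS =====

-- keep everything when the only dropped index cannot occur (all indices start at s > 0; drop set {0})
lemma pv_filt_zero {α : Type} (xs : List α) (s : Int) (hs : 0 < s) :
    ((PySem.List.enumerate xs s).filter (fun p => !(PySem.Set.contains [(0:Int)] p.1))).map (·.2) = xs := by
  induction xs generalizing s with
  | nil => simp [PySem.List.enumerate_nil]
  | cons x xs ih =>
      rw [PySem.List.enumerate_cons]
      have hc : PySem.Set.contains [(0:Int)] s = false := by
        simp [PySem.Set.contains]; omega
      simp only [List.filter_cons, hc, Bool.not_false, if_true, List.map_cons]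
      rw [ih (s+1) (by omega)]

-- drop exactly the last element: indices run s .. s+len-1 = m (drop set {m})
lemma pv_filt_last {α : Type} (xs : List α) (s m : Int) (h : s + xs.length = m + 1) :
    ((PySem.List.enumerate xs s).filter (fun p => !(PySem.Set.contains [m] p.1))).map (·.2) = xs.dropLast := by
  induction xs generalizing s with
  | nil => simp [PySem.List.enumerate_nil]
  | cons x xs ih =>
      rw [PySem.List.enumerate_cons]
      cases xs with
      | nil =>
          have hsm : s = m := by simpa using h
          simp [PySem.Set.contains, hsm]
      | cons y ys =>
          have hc : PySem.Set.contains [m] s = false := by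
            simp [PySem.Set.contains]
            simp only [List.length_cons] at h
            omega
          simp only [List.filter_cons, hc, Bool.not_false, if_true, List.map_cons]
          rw [ih (s+1) (by simp only [List.length_cons] at h ⊢; omega)]
          simp [List.dropLast]

-- drop set {0, m} seen from start s > 0: same as dropping the last
lemma pv_filt_both {α : Type} (xs : List α) (s m : Int) (hs : 0 < s) (h : s + xs.length = m + 1) :
    ((PySem.List.enumerate xs s).filter (fun p => !(PySem.Set.contains [(0:Int), m] p.1))).map (·.2) = xs.dropLast := by
  induction xs generalizing s with
  | nil => simp [PySem.List.enumerate_nil]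
  | cons x xs ih =>
      rw [PySem.List.enumerate_cons]
      cases xs with
      | nil =>
          have hsm : s = m := by simpa using h
          simp [PySem.Set.contains, hsm]
      | cons y ys =>
          have hc : PySem.Set.contains [(0:Int), m] s = false := by
            simp [PySem.Set.contains]
            simp only [List.length_cons] at h
            omega
          simp only [List.filter_cons, hc, Bool.not_false, if_true, List.map_cons]
          rw [ih (s+1) (by omega) (by simp only [List.length_cons] at h ⊢; omega)]
          simp [List.dropLast]

-- from index 0: drop set {0} drops exactly the head
lemma pv_filt_first0 {α : Type} (x : α) (xs : List α) :
    ((PySem.List.enumerate (x :: xs) 0).filter (fun p => !(PySem.Set.contains [(0:Int)] p.1))).map (·.2) = xs := by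
  rw [PySem.List.enumerate_cons]
  have hc : PySem.Set.contains [(0:Int)] 0 = true := by simp [PySem.Set.contains]
  simp only [List.filter_cons, hc, Bool.not_true, Bool.false_eq_true, if_false]
  have := pv_filt_zero xs (0+1) (by omega)
  simpa using this

-- from index 0: drop set {0, m} with m the last index drops head and last
lemma pv_filt_both0 {α : Type} (x : α) (xs : List α) (m : Int) (h : (xs.length : Int) = m) :
    ((PySem.List.enumerate (x :: xs) 0).filter (fun p => !(PySem.Set.contains [(0:Int), m] p.1))).map (·.2) = xs.dropLast := by
  rw [PySem.List.enumerate_cons]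
  have hc : PySem.Set.contains [(0:Int), m] 0 = true := by simp [PySem.Set.contains]
  simp only [List.filter_cons, hc, Bool.not_true, Bool.false_eq_true, if_false]
  have := pv_filt_both xs (0+1) m (by omega) (by omega)
  simpa using this

-- trimHead on a reversal: drop the LAST element iff it is a dropped token
lemma pv_trim_head_reverse (dg : String) (l : List String) (h : l ≠ []) :
    (pv_trim_head dg l.reverse).reverse =
      if (pv_split_token (l.getLast h) dg).2.2.isSome && PySem.Str.startswith (pv_split_token (l.getLast h) dg).2.1 "E"
      then l.dropLast else l := by
  conv_lhs => rw [← List.dropLast_append_getLast h]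
  rw [List.reverse_append]
  simp only [List.reverse_singleton, List.singleton_append, pv_trim_head]
  split_ifs with hb
  · simp
  · simpa using List.dropLast_append_getLast h

theorem strip_terminal_coords_spec : Claim_equal_strip_terminal_coords := by
  intro tokens dg _hdom
  unfold Spec_strip_terminal_coords
  match tokens with
  | [] => rfl
  | t :: ts =>
      have hne : (t :: ts : List String) ≠ [] := by simp
      have hlastD : PySem.List.pyGetD (t :: ts) ((↑(t :: ts).length) - 1 : Int) "" = (t :: ts).getLast hne := by
        rw [PySem.List.pyGetD_eq_getElem (h0 := by simp only [List.length_cons]; omega) (h1 := by simp),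
          List.getLast_eq_getElem]
        congr 1
        omega
      unfold strip_terminal_coords strip_terminal_coords_alt
      rw [if_neg hne]
      simp only [List.foldl, PySem.List.pyGetD_zero_cons, hlastD]
      rw [pv_trim_head]
      cases hb0 : ((pv_split_token t dg).2.2.isSome && PySem.Str.startswith (pv_split_token t dg).2.1 "E") with
      | true =>
          simp only [if_true]
          cases ts with
          | nil =>
              -- single element: A drops index 0 (the set collapses), B trims the head then nothing
              have hl : ([t] : List String).getLast hne = t := rfl
              rw [hl, hb0]
              simp only [if_true]
              have hadd : (PySem.Set.empty.add (0:Int)).add ((↑([t] : List String).length : Int) - 1) = [(0:Int)] := by simp only [List.length_cons, List.length_nil]; decide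
              rw [hadd, if_pos (by simp)]
              rw [pv_filt_first0 t []]
              rfl
          | cons u us =>
              have hcons : (u :: us : List String) ≠ [] := by simp
              have hlast : (t :: u :: us).getLast hne = (u :: us).getLast hcons := List.getLast_cons hcons
              rw [hlast]
              rw [pv_trim_head_reverse dg (u :: us) hcons]
              cases hb1 : ((pv_split_token ((u :: us).getLast hcons) dg).2.2.isSome && PySem.Str.startswith (pv_split_token ((u :: us).getLast hcons) dg).2.1 "E") with
              | true =>
                  simp only [if_true]
                  have hadd : (PySem.Set.empty.add (0:Int)).add ((↑(t :: u :: us).length : Int) - 1) = [0, ((t :: u :: us).length : Int) - 1] := by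
                    rw [PySem.Set.add_of_not_mem (by intro h; simp at h; omega),
                        PySem.Set.add_of_not_mem (by intro h; simp [PySem.Set.empty] at h)]
                    rfl
                  rw [hadd, if_pos (by simp)]
                  rw [pv_filt_both0 t (u :: us) _ (by simp)]
              | false =>
                  simp only [Bool.false_eq_true, if_false]
                  have hadd : PySem.Set.empty.add (0:Int) = [(0:Int)] := rfl
                  rw [hadd, if_pos (by simp)]
                  rw [pv_filt_first0 t (u :: us)]
      | false =>
          simp only [Bool.false_eq_true, if_false]
          rw [pv_trim_head_reverse dg (t :: ts) hne]
          cases hb1 : ((pv_split_token ((t :: ts).getLast hne) dg).2.2.isSome && PySem.Str.startswith (pv_split_token ((t :: ts).getLast hne) dg).2.1 "E") with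
          | true =>
              simp only [if_true]
              have hadd : PySem.Set.empty.add ((↑(t :: ts).length : Int) - 1) = [((t :: ts).length : Int) - 1] := rfl
              rw [hadd, if_pos (by simp)]
              rw [pv_filt_last (t :: ts) 0 _ (by simp)]
          | false =>
              simp only [Bool.false_eq_true, if_false]
              rw [if_neg (by simp [PySem.Set.empty])]
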